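-- pv_equiv track=rewrite | github.com/ErmalZeqo/Crypto-vigenere | cryptanalyse_vigenere.py | clef_par_decalages
-- ===== SOURCE A (Python) =====
-- alphabet = "ABCDEFGHIJKLMNOPQRSTUVWXYZ"
--
-- def freq(txt):
--     """
--     Calcule le nombre d'occurrences de chaque lettre (A..Z)
--     dans un texte donné.
--
--     Retourne une liste de 26 entiers.
--     """
--     hist = [0] * len(alphabet)   # 26 cases, toutes à 0
--
--     for lettre in txt:
--         if 'A' <= lettre <= 'Z':                 # on garde seulement les majuscules
--             indice = ord(lettre) - ord('A')      # A->0, B->1, ..., Z->25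
--             hist[indice] += 1                    # on ajoute 1 occurrence
--
--     return hist
--
-- def lettre_freq_max(txt):
--     """
--     Renvoie l'indice (0..25) de la lettre la plus fréquente dans txt.
--     En cas d'égalité, on renvoie la lettre la plus petite alphabétiquement.
--     """
--     hist = freq(txt)  # liste de 26 entiers
--
--     indice_max = 0
--     for i in range(1, len(hist)):
--         if hist[i] > hist[indice_max]:
--             indice_max = i
--
--     return indice_max
--
-- def clef_par_decalages(cipher, key_length):
--     """
--     Renvoie la clé (liste d'entiers) estimée en supposant que,
--     dans chaque colonne, la lettre la plus fréquente correspond à E.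
--     """
--     decalages = [0] * key_length
--     indice_E = ord('E') - ord('A')  # 4
--
--     # 1) construire les colonnes
--     colonnes = [""] * key_length
--     for i, c in enumerate(cipher):
--         colonnes[i % key_length] += c
--
--     # 2) pour chaque colonne, trouver la lettre la plus fréquente
--     for j, col in enumerate(colonnes):
--         if len(col) == 0:
--             decalages[j] = 0
--             continue
--
--         idx_max = lettre_freq_max(col)              # index 0..25
--         decalages[j] = (idx_max - indice_E) % 26    # k = (max - E) mod 26
--
--     return decalages
-- ===== SOURCE B (Python) =====
-- def clef_par_decalages(cipher, key_length):
--     """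
--     Estimates the key: split the cipher into its key_length columns, then for
--     each column sort its A-Z letters and scan the runs of the sorted list once;
--     the longest run (first, hence smallest, letter on ties) is assumed to
--     encode 'E'.
--     """
--     cols = [[] for _ in range(key_length)]
--     for i, c in enumerate(cipher):
--         cols[i % key_length].append(c)
--     decalages = []
--     for col in cols:
--         if not col:
--             decalages.append(0)
--             continue
--         letters = sorted(c for c in col if 'A' <= c <= 'Z')
--         best_idx = best_run = run = 0
--         prev = None
--         for c in letters:
--             run = run + 1 if c == prev else 1
--             prev = c
--             if run > best_run:
--                 best_run, best_idx = run, ord(c) - ord('A')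
--         decalages.append((best_idx - 4) % 26)
--     return decalages
-- ===== Notes on version B (the rewrite author's own statement) =====
-- stated objective: alternative
-- what changed: B finds each column's most frequent letter by sorting the column's A-Z letters and scanning the runs of the sorted list once (strict '>' so the smallest letter wins ties), instead of A's 26-bucket histogram plus argmax sweep; Pre_ excludes only key_length <= 0 with a non-empty cipher, where A raises (ZeroDivisionError or IndexError).
import Mathlib
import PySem

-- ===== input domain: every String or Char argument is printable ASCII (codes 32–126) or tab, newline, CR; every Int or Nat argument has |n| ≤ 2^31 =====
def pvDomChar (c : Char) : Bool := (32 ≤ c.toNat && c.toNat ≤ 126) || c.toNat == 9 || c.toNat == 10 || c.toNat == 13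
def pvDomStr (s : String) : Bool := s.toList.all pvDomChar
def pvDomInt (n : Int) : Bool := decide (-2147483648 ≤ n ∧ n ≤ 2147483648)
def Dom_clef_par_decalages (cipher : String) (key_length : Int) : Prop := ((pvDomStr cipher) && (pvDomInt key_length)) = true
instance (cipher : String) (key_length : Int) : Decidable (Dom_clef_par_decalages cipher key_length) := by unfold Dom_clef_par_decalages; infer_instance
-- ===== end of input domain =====

-- B replaces A's 26-bucket histogram/argmax per column by a sort of the column's
-- A-Z letters and a single run-length scan of the sorted list (strict '>' keeps
-- the smallest letter on ties). Equivalence of the RETURN value on Pre_.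

-- ===== PORT A =====
-- freq(txt): 26-bucket histogram of the uppercase letters of txt
def freqA (txt : List Char) : List Int :=
  txt.foldl (fun hist lettre =>
    if 'A' ≤ lettre ∧ lettre ≤ 'Z' then
      let indice := lettre.toNat - 65          -- ord(lettre) - ord('A')
      hist.set indice (hist.getD indice 0 + 1) -- hist[indice] += 1 (indice always in range)
    else hist) (List.replicate 26 0)

-- lettre_freq_max(txt): argmax over the histogram, first (smallest) index on ties
def lettre_freq_maxA (txt : List Char) : Nat :=
  let hist := freqA txt
  (List.range' 1 25).foldl                     -- range(1, len(hist)) = 1..25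
    (fun indice_max i => if hist.getD i 0 > hist.getD indice_max 0 then i else indice_max) 0

def clef_par_decalages (cipher : String) (key_length : Int) : List Int :=
  let indice_E : Int := 4
  -- 1) build the columns: colonnes[i % key_length] += c
  let colonnes := (PySem.List.enumerate cipher.toList).foldl
    (fun cols p =>
      let idx := (PySem.Int.mod p.1 key_length).toNat  -- i % key_length (≥ 0 whenever Python does not raise)
      cols.set idx (cols.getD idx [] ++ [p.2]))
    (List.replicate key_length.toNat ([] : List Char))
  -- 2) per column, most frequent letter
  (PySem.List.enumerate colonnes).foldl
    (fun dec p =>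
      if p.2.length = 0 then dec.set p.1.toNat 0
      else dec.set p.1.toNat (PySem.Int.mod ((lettre_freq_maxA p.2 : Int) - indice_E) 26))
    (List.replicate key_length.toNat (0 : Int))

-- ===== PORT B =====
-- the body of the inner 'for c in letters' loop of Source B, on state (best_idx, best_run, prev, run)
def scanStep (st : Nat × Nat × Option Char × Nat) (c : Char) : Nat × Nat × Option Char × Nat :=
  let run := if some c = st.2.2.1 then st.2.2.2 + 1 else 1
  if run > st.2.1 then (c.toNat - 65, run, some c, run)
  else (st.1, st.2.1, some c, run)

-- the inner 'for c in letters' loop of Source B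
def runScan (letters : List Char) : Nat × Nat × Option Char × Nat :=
  letters.foldl scanStep (0, 0, none, 0)

def clef_par_decalages_alt (cipher : String) (key_length : Int) : List Int :=
  -- cols[i % key_length].append(c)
  let cols := (PySem.List.enumerate cipher.toList).foldl
    (fun cols p =>
      let idx := (PySem.Int.mod p.1 key_length).toNat
      cols.set idx (cols.getD idx [] ++ [p.2]))
    (List.replicate key_length.toNat ([] : List Char))
  cols.foldl (fun dec col =>
    if col = [] then dec ++ [(0 : Int)]
    else dec ++ [PySem.Int.mod (((runScan (PySem.List.sorted
      (col.filter (fun c => decide ('A' ≤ c ∧ c ≤ 'Z'))) (fun c => c) false)).1 : Int) - 4) 26]) []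

-- ===== PRECONDITION & SPEC =====
-- Pre_ excludes exactly the inputs where Python A raises: key_length ≤ 0 with a
-- non-empty cipher (ZeroDivisionError for 0, IndexError for a negative key_length).
def Pre_clef_par_decalages (cipher : String) (key_length : Int) : Prop :=
  0 < key_length ∨ cipher = ""
instance (cipher : String) (key_length : Int) : Decidable (Pre_clef_par_decalages cipher key_length) := by
  unfold Pre_clef_par_decalages; infer_instance

def pvWitness_clef_par_decalages : String × Int := ("WIKIPEDIA", 3)

def Spec_clef_par_decalages (cipher : String) (key_length : Int) (out : List Int) : Prop := out = clef_par_decalages_alt cipher key_length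
instance (cipher : String) (key_length : Int) (out : List Int) : Decidable (Spec_clef_par_decalages cipher key_length out) := by unfold Spec_clef_par_decalages; infer_instance

-- ===== CLAIM (what is proved, stated in full; the proofs are below) =====
def Claim_equal_clef_par_decalages : Prop := ∀ (cipher : String) (key_length : Int), Dom_clef_par_decalages cipher key_length → Pre_clef_par_decalages cipher key_length → Spec_clef_par_decalages cipher key_length (clef_par_decalages cipher key_length)

-- ===== LEMMAS AND PROOFS =====

-- the count of letter i (0..25) among the uppercase letters of L
def cntL (L : List Char) (i : Nat) : Nat :=
  L.countP (fun c => decide (('A' ≤ c ∧ c ≤ 'Z') ∧ c.toNat = 65 + i))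

-- r is "A's argmax" of f below 26: maximal value, smallest index on ties
def IsBest (f : Nat → Nat) (r : Nat) : Prop :=
  r < 26 ∧ (∀ i < 26, f i ≤ f r) ∧ (∀ i < r, f i < f r)

theorem isBest_unique (f : Nat → Nat) (r₁ r₂ : Nat)
    (h₁ : IsBest f r₁) (h₂ : IsBest f r₂) : r₁ = r₂ := by
  obtain ⟨hl1, hmax1, hmin1⟩ := h₁
  obtain ⟨hl2, hmax2, hmin2⟩ := h₂
  rcases Nat.lt_trichotomy r₁ r₂ with h | h | h
  · have := hmin2 r₁ h; have := hmax1 r₂ hl2; omega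
  · exact h
  · have := hmin1 r₂ h; have := hmax2 r₁ hl1; omega

theorem char_le_iff (a b : Char) : a ≤ b ↔ a.toNat ≤ b.toNat := by
  simp [Char.le_def, UInt32.le_iff_toNat_le]

theorem char_lt_iff (a b : Char) : a < b ↔ a.toNat < b.toNat := by
  simp [Char.lt_def, UInt32.lt_iff_toNat_lt]

theorem char_eq_of_toNat {a b : Char} (h : a.toNat = b.toNat) : a = b := by
  apply Char.ext; exact UInt32.toNat_inj.mp h

theorem upper_toNat {c : Char} (h : 'A' ≤ c ∧ c ≤ 'Z') : 65 ≤ c.toNat ∧ c.toNat ≤ 90 := by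
  rw [char_le_iff, char_le_iff] at h; exact h

theorem getD_set_self (l : List Int) (i : Nat) (v : Int) (h : i < l.length) :
    (l.set i v).getD i 0 = v := by
  simp [List.getD_eq_getElem?_getD, h]

theorem getD_set_other (l : List Int) (a i : Nat) (v : Int) (h : a ≠ i) :
    (l.set a v).getD i 0 = l.getD i 0 := by
  simp [List.getD_eq_getElem?_getD, h]

theorem freq_loop (txt : List Char) : ∀ (hist : List Int), hist.length = 26 → ∀ i, i < 26 →
    (txt.foldl (fun hist lettre =>
      if 'A' ≤ lettre ∧ lettre ≤ 'Z' then
        let indice := lettre.toNat - 65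
        hist.set indice (hist.getD indice 0 + 1)
      else hist) hist).getD i 0 = hist.getD i 0 + (cntL txt i : Int) := by
  induction txt with
  | nil => intro hist _ i _; simp [cntL]
  | cons c txt ih =>
    intro hist hlen i hi
    simp only [List.foldl_cons]
    by_cases hc : 'A' ≤ c ∧ c ≤ 'Z'
    · rw [if_pos hc]
      have hlen' : (hist.set (c.toNat - 65) (hist.getD (c.toNat - 65) 0 + 1)).length = 26 := by
        simp [hlen]
      rw [ih _ hlen' i hi]
      have hcN := upper_toNat hc
      by_cases hic : c.toNat - 65 = i
      · subst hic
        rw [getD_set_self _ _ _ (by omega)]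
        have hpred : cntL (c :: txt) (c.toNat - 65) = cntL txt (c.toNat - 65) + 1 := by
          simp only [cntL, List.countP_cons, decide_eq_true_eq]
          rw [if_pos ⟨hc, by omega⟩]
        rw [hpred]; push_cast; ring
      · rw [getD_set_other _ _ _ _ hic]
        have hpred : cntL (c :: txt) i = cntL txt i := by
          simp only [cntL, List.countP_cons, decide_eq_true_eq]
          rw [if_neg (by rintro ⟨_, h⟩; omega)]; simp
        rw [hpred]
    · rw [if_neg hc]
      rw [ih _ hlen i hi]
      have hpred : cntL (c :: txt) i = cntL txt i := by
        simp only [cntL, List.countP_cons, decide_eq_true_eq]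
        rw [if_neg (by rintro ⟨h, _⟩; exact hc h)]; simp
      rw [hpred]

theorem freqA_getD (txt : List Char) (i : Nat) (hi : i < 26) :
    (freqA txt).getD i 0 = (cntL txt i : Int) := by
  unfold freqA
  rw [freq_loop txt (List.replicate 26 0) (by simp) i hi, List.getD_replicate _ hi]
  ring

theorem argmax_loop (hist : List Int) (n : Nat) :
    ((List.range' 1 n).foldl
        (fun m i => if hist.getD i 0 > hist.getD m 0 then i else m) 0) ≤ n ∧
    (∀ i ≤ n, hist.getD i 0 ≤
      hist.getD ((List.range' 1 n).foldl
        (fun m i => if hist.getD i 0 > hist.getD m 0 then i else m) 0) 0) ∧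
    (∀ i < (List.range' 1 n).foldl
        (fun m i => if hist.getD i 0 > hist.getD m 0 then i else m) 0,
      hist.getD i 0 <
      hist.getD ((List.range' 1 n).foldl
        (fun m i => if hist.getD i 0 > hist.getD m 0 then i else m) 0) 0) := by
  induction n with
  | zero =>
    refine ⟨Nat.le_refl _, ?_, ?_⟩
    · intro i hi; interval_cases i; simp
    · intro i hi; simp only [List.range'_zero, List.foldl_nil] at hi; omega
  | succ n ih =>
    have hcat : List.range' 1 (n + 1) = List.range' 1 n ++ [1 + n] := by
      have := @List.range'_concat 1 1 n
      simpa using this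
    rw [hcat, List.foldl_append]
    obtain ⟨hle, hmax, hmin⟩ := ih
    set r := (List.range' 1 n).foldl
        (fun m i => if hist.getD i 0 > hist.getD m 0 then i else m) 0 with hr
    simp only [List.foldl_cons, List.foldl_nil]
    by_cases hgt : hist.getD (1 + n) 0 > hist.getD r 0
    · rw [if_pos hgt]
      refine ⟨by omega, ?_, ?_⟩
      · intro i hi
        rcases Nat.lt_or_ge i (n + 1) with h | h
        · have := hmax i (by omega); have : hist.getD i 0 ≤ hist.getD r 0 := this; omega
        · have : i = 1 + n := by omega
          rw [this]
      · intro i hi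
        have := hmax i (by omega)
        omega
    · rw [if_neg hgt]
      refine ⟨by omega, ?_, hmin⟩
      intro i hi
      rcases Nat.lt_or_ge i (n + 1) with h | h
      · exact hmax i (by omega)
      · have : i = 1 + n := by omega
        rw [this]; omega

theorem lettre_freq_maxA_isBest (txt : List Char) :
    IsBest (cntL txt) (lettre_freq_maxA txt) := by
  unfold lettre_freq_maxA
  obtain ⟨hle, hmax, hmin⟩ := argmax_loop (freqA txt) 25
  set r := (List.range' 1 25).foldl
      (fun m i => if (freqA txt).getD i 0 > (freqA txt).getD m 0 then i else m) 0 with hr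
  refine ⟨by omega, ?_, ?_⟩
  · intro i hi
    have h := hmax i (by omega)
    rw [freqA_getD txt i hi, freqA_getD txt r (by omega)] at h
    exact_mod_cast h
  · intro i hi
    have h := hmin i hi
    rw [freqA_getD txt i (by omega), freqA_getD txt r (by omega)] at h
    exact_mod_cast h

theorem cntL_count (s : List Char) (hup : ∀ x ∈ s, 'A' ≤ x ∧ x ≤ 'Z') (c : Char)
    (hc : 'A' ≤ c ∧ c ≤ 'Z') : cntL s (c.toNat - 65) = s.count c := by
  have hcN := upper_toNat hc
  rw [List.count_eq_countP]
  apply List.countP_congr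
  intro x hx
  have hxN := upper_toNat (hup x hx)
  simp only [decide_eq_true_eq, beq_iff_eq]
  constructor
  · rintro ⟨_, h⟩; exact char_eq_of_toNat (by omega)
  · rintro rfl; exact ⟨hup x hx, by omega⟩

theorem cntL_append_single (s : List Char) (c : Char) (i : Nat) :
    cntL (s ++ [c]) i = cntL s i + if ('A' ≤ c ∧ c ≤ 'Z') ∧ c.toNat = 65 + i then 1 else 0 := by
  simp [cntL, List.countP_append, List.countP_cons]

theorem sorted_le_getLast {l : List Char} {c x : Char} (h : l.Pairwise (· ≤ ·))
    (hx : x ∈ l) (hc : l.getLast? = some c) : x ≤ c := by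
  induction l using List.reverseRecOn with
  | nil => cases hx
  | append_singleton s a _ih =>
    rw [List.getLast?_concat, Option.some_inj] at hc
    rw [List.pairwise_append] at h
    rcases List.mem_append.mp hx with hx2 | hx2
    · exact hc ▸ h.2.2 x hx2 a (by simp)
    · rw [List.mem_singleton] at hx2; subst hx2; exact le_of_eq (by rw [hc])

theorem runScan_inv (s : List Char) (hs : s.Pairwise (· ≤ ·))
    (hup : ∀ c ∈ s, 'A' ≤ c ∧ c ≤ 'Z') :
    (runScan s).2.2.1 = s.getLast? ∧
    (runScan s).1 < 26 ∧
    cntL s (runScan s).1 = (runScan s).2.1 ∧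
    (∀ i < 26, cntL s i ≤ (runScan s).2.1) ∧
    (∀ i < (runScan s).1, cntL s i < (runScan s).2.1) ∧
    (∀ c, s.getLast? = some c → (runScan s).2.2.2 = s.count c ∧ 65 + (runScan s).1 ≤ c.toNat) := by
  induction s using List.reverseRecOn with
  | nil =>
    refine ⟨rfl, by simp [runScan], rfl, ?_, ?_, ?_⟩
    · intro i _; simp [cntL, runScan]
    · intro i hi; simp [runScan] at hi
    · intro c hc; simp at hc
  | append_singleton s c _ =>
    rename_i ih
    rw [List.pairwise_append] at hs
    have hup' : ∀ x ∈ s, 'A' ≤ x ∧ x ≤ 'Z' := fun x hx => hup x (by simp [hx])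
    have hc : 'A' ≤ c ∧ c ≤ 'Z' := hup c (by simp)
    have hcN := upper_toNat hc
    have key : runScan (s ++ [c]) = scanStep (runScan s) c := by
      unfold runScan; rw [List.foldl_append]; rfl
    obtain ⟨ih1, ih2, ih3, ih4, ih5, ih6⟩ := ih hs.1 hup'
    rcases hsnil : s.getLast? with _ | l
    · -- s is empty
      have hnil : s = [] := List.getLast?_eq_none_iff.mp hsnil
      subst hnil
      have hscan : runScan ([] ++ [c]) = (c.toNat - 65, 1, some c, 1) := by
        rw [key]; simp [runScan, scanStep]
      rw [hscan]
      refine ⟨by simp, by omega, ?_, ?_, ?_, ?_⟩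
      · show cntL [c] (c.toNat - 65) = 1
        simp only [cntL, List.countP_cons, List.countP_nil, decide_eq_true_eq]
        rw [if_pos ⟨hc, by omega⟩]
      · intro i _
        calc cntL [c] i ≤ [c].length := List.countP_le_length
        _ = 1 := rfl
      · intro i hi
        show cntL [c] i < 1
        simp only [cntL, List.countP_cons, List.countP_nil, decide_eq_true_eq]
        rw [if_neg (by rintro ⟨_, h⟩; omega)]
        omega
      · intro d hd
        simp only [List.nil_append] at hd
        have hdc : c = d := by simpa using hd
        subst hdc
        exact ⟨by simp, by omega⟩
    · -- s is non-empty, last letter l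
      obtain ⟨ihcr, ihbl⟩ := ih6 l hsnil
      have hlmem := List.mem_of_getLast? (l := s) hsnil
      have hlup := hup' l hlmem
      have hlN := upper_toNat hlup
      have hlle : ∀ x ∈ s, x ≤ l := fun x hx => sorted_le_getLast hs.1 hx hsnil
      have cb : cntL s (l.toNat - 65) = s.count l := cntL_count s hup' l hlup
      have hbr : s.count l ≤ (runScan s).2.1 := by
        rw [← cb]; exact ih4 (l.toNat - 65) (by omega)
      rw [hsnil] at ih1
      by_cases hcl : c = l
      · -- run = cr + 1
        subst hcl
        have hrun : (if some c = (runScan s).2.2.1 then (runScan s).2.2.2 + 1 else 1)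
            = s.count c + 1 := by rw [ih1, if_pos rfl, ihcr]
        by_cases hgt : s.count c + 1 > (runScan s).2.1
        · have hbrcr : (runScan s).2.1 = s.count c := by omega
          have hscan : runScan (s ++ [c]) = (c.toNat - 65, s.count c + 1, some c, s.count c + 1) := by
            rw [key]; unfold scanStep; rw [hrun, if_pos hgt]
          rw [hscan]; dsimp only
          refine ⟨by simp, by omega, ?_, ?_, ?_, ?_⟩
          · show cntL (s ++ [c]) (c.toNat - 65) = s.count c + 1
            rw [cntL_append_single, if_pos ⟨hc, by omega⟩, cb]
          · intro i hi
            rw [cntL_append_single]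
            by_cases hie : c.toNat = 65 + i
            · have : i = c.toNat - 65 := by omega
              subst this
              rw [if_pos ⟨hc, by omega⟩, cb]
            · rw [if_neg (by rintro ⟨_, h⟩; exact hie h)]
              have := ih4 i hi; omega
          · intro i hi
            rw [cntL_append_single, if_neg (by rintro ⟨_, h⟩; omega)]
            have := ih4 i (by omega); omega
          · intro d hd
            rw [List.getLast?_concat, Option.some_inj] at hd
            subst hd
            refine ⟨by simp [List.count_append], by omega⟩
        · have hscan : runScan (s ++ [c]) =
              ((runScan s).1, (runScan s).2.1, some c, s.count c + 1) := by
            rw [key]; unfold scanStep; rw [hrun, if_neg hgt]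
          have hbine : ¬ (c.toNat = 65 + (runScan s).1) := by
            intro h
            have : (runScan s).1 = c.toNat - 65 := by omega
            rw [this, cb] at ih3
            omega
          rw [hscan]; dsimp only
          refine ⟨by simp, by omega, ?_, ?_, ?_, ?_⟩
          · show cntL (s ++ [c]) (runScan s).1 = (runScan s).2.1
            rw [cntL_append_single, if_neg (by rintro ⟨_, h⟩; exact hbine h)]
            simp [ih3]
          · intro i hi
            rw [cntL_append_single]
            by_cases hie : c.toNat = 65 + i
            · have : i = c.toNat - 65 := by omega
              subst this
              rw [if_pos ⟨hc, by omega⟩, cb]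
              omega
            · rw [if_neg (by rintro ⟨_, h⟩; exact hie h)]
              have := ih4 i hi; omega
          · intro i hi
            rw [cntL_append_single, if_neg (by rintro ⟨_, h⟩; omega)]
            have := ih5 i hi; omega
          · intro d hd
            rw [List.getLast?_concat, Option.some_inj] at hd
            subst hd
            refine ⟨by simp [List.count_append], ihbl⟩
      · -- new letter c > l
        have hlc : l ≤ c := hs.2.2 l hlmem c (by simp)
        have hltc : l < c := lt_of_le_of_ne hlc (fun h => hcl h.symm)
        have hltN : l.toNat < c.toNat := (char_lt_iff l c).mp hltc
        have hcnot : c ∉ s := by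
          intro hmem
          exact absurd (le_antisymm (hlle c hmem) hlc) hcl
        have hcount0 : s.count c = 0 := List.count_eq_zero.mpr hcnot
        have cb2 : cntL s (c.toNat - 65) = 0 := by rw [cntL_count s hup' c hc, hcount0]
        have hbr1 : 1 ≤ (runScan s).2.1 := by
          have := List.count_pos_iff.mpr hlmem
          omega
        have hrun : (if some c = (runScan s).2.2.1 then (runScan s).2.2.2 + 1 else 1) = 1 := by
          rw [ih1, if_neg (by simpa using hcl)]
        have hscan : runScan (s ++ [c]) = ((runScan s).1, (runScan s).2.1, some c, 1) := by
          rw [key]; unfold scanStep; rw [hrun, if_neg (by omega)]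
        rw [hscan]; dsimp only
        refine ⟨by simp, by omega, ?_, ?_, ?_, ?_⟩
        · show cntL (s ++ [c]) (runScan s).1 = (runScan s).2.1
          rw [cntL_append_single, if_neg (by rintro ⟨_, h⟩; omega)]
          simp [ih3]
        · intro i hi
          rw [cntL_append_single]
          by_cases hie : c.toNat = 65 + i
          · have : i = c.toNat - 65 := by omega
            subst this
            rw [if_pos ⟨hc, by omega⟩, cb2]
            omega
          · rw [if_neg (by rintro ⟨_, h⟩; exact hie h)]
            have := ih4 i hi; omega
        · intro i hi
          rw [cntL_append_single, if_neg (by rintro ⟨_, h⟩; omega)]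
          have := ih5 i hi; omega
        · intro d hd
          rw [List.getLast?_concat, Option.some_inj] at hd
          subst hd
          refine ⟨by simp [List.count_append, hcount0], by omega⟩

theorem runScan_isBest (s : List Char) (hs : s.Pairwise (· ≤ ·))
    (hup : ∀ c ∈ s, 'A' ≤ c ∧ c ≤ 'Z') :
    IsBest (cntL s) (runScan s).1 := by
  obtain ⟨_, h2, h3, h4, h5, _⟩ := runScan_inv s hs hup
  exact ⟨h2, fun i hi => by rw [h3]; exact h4 i hi, fun i hi => by rw [h3]; exact h5 i hi⟩

theorem take_set_succ (l : List Int) (s : Nat) (v : Int) (h : s < l.length) :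
    (l.set s v).take (s + 1) = l.take s ++ [v] := by
  rw [List.take_add_one, List.take_set_of_le (le_refl s)]
  simp [h]

theorem set_fold_map {α : Type} (g : α → Int) :
    ∀ (l : List α) (s : Nat) (acc : List Int), acc.length = s + l.length →
    (PySem.List.enumerate l (s : Int)).foldl (fun dec p => dec.set p.1.toNat (g p.2)) acc
      = acc.take s ++ l.map g := by
  intro l
  induction l with
  | nil =>
    intro s acc h
    simp only [PySem.List.enumerate_nil, List.foldl_nil, List.map_nil, List.append_nil]
    have hsl : acc.length = s := by simpa using h
    rw [← hsl, List.take_length]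
  | cons x xs ih =>
    intro s acc h
    rw [PySem.List.enumerate_cons, List.foldl_cons]
    have hcast : ((s : Int) + 1) = ((s + 1 : Nat) : Int) := by push_cast; ring
    rw [hcast, ih (s + 1) _ (by simp only [List.length_set]; simp at h ⊢; omega)]
    simp only [Int.toNat_natCast]
    rw [take_set_succ _ _ _ (by simp at h; omega)]
    simp

-- the per-column value A computes
def valA (col : List Char) : Int :=
  if col.length = 0 then 0 else PySem.Int.mod ((lettre_freq_maxA col : Int) - 4) 26

-- the per-column value B computes
def valB (col : List Char) : Int :=
  if col = [] then 0
  else PySem.Int.mod (((runScan (PySem.List.sorted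
    (col.filter (fun c => decide ('A' ≤ c ∧ c ≤ 'Z'))) (fun c => c) false)).1 : Int) - 4) 26

theorem perCol (col : List Char) : valA col = valB col := by
  rw [valA, valB]
  by_cases hnil : col = []
  · rw [if_pos (by simp [hnil]), if_pos hnil]
  · rw [if_neg (by simp [List.length_eq_zero_iff, hnil]), if_neg hnil]
    set letters := PySem.List.sorted
        (col.filter (fun c => decide ('A' ≤ c ∧ c ≤ 'Z'))) (fun c => c) false with hletters
    have hcnt : ∀ i, cntL letters i = cntL col i := by
      intro i
      have hperm : letters.Perm (col.filter (fun c => decide ('A' ≤ c ∧ c ≤ 'Z'))) :=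
        PySem.List.sorted_perm _ _ _
      unfold cntL
      rw [hperm.countP_eq, List.countP_filter]
      apply List.countP_congr
      intro x _
      simp only [Bool.and_eq_true, decide_eq_true_eq]
      constructor
      · rintro ⟨h, _⟩; exact h
      · rintro ⟨h1, h2⟩; exact ⟨⟨h1, h2⟩, h1⟩
    have hsorted : letters.Pairwise (· ≤ ·) := PySem.List.sorted_pairwise _ _
    have hupl : ∀ c ∈ letters, 'A' ≤ c ∧ c ≤ 'Z' := by
      intro c hcm
      rw [hletters, PySem.List.mem_sorted, List.mem_filter] at hcm
      simpa using hcm.2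
    have hBest1 := lettre_freq_maxA_isBest col
    have hBest2 := runScan_isBest letters hsorted hupl
    have hBest2' : IsBest (cntL col) (runScan letters).1 := by
      obtain ⟨b1, b2, b3⟩ := hBest2
      exact ⟨b1, fun i hi => by rw [← hcnt i, ← hcnt _]; exact b2 i hi,
             fun i hi => by rw [← hcnt i, ← hcnt _]; exact b3 i hi⟩
    rw [isBest_unique (cntL col) _ _ hBest1 hBest2']

-- ===== VERDICT (by name: the statement is the Claim_ definition above) =====
theorem clef_par_decalages_spec : Claim_equal_clef_par_decalages := by
  unfold Claim_equal_clef_par_decalages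
  intro cipher k _ hpre
  unfold Spec_clef_par_decalages
  simp only [clef_par_decalages, clef_par_decalages_alt]
  set cols := (PySem.List.enumerate cipher.toList).foldl
    (fun cols p =>
      let idx := (PySem.Int.mod p.1 k).toNat
      cols.set idx (cols.getD idx [] ++ [p.2]))
    (List.replicate k.toNat ([] : List Char)) with hcols
  have hcolslen : cols.length = k.toNat := by
    rw [hcols]
    have : ∀ (l : List (Int × Char)) (acc : List (List Char)),
        (l.foldl (fun cols (p : Int × Char) =>
          let idx := (PySem.Int.mod p.1 k).toNat
          cols.set idx (cols.getD idx [] ++ [p.2])) acc).length = acc.length := by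
      intro l
      induction l with
      | nil => intro acc; rfl
      | cons x xs ih => intro acc; rw [List.foldl_cons, ih]; simp
    rw [this]; simp
  -- A's second loop writes position p.1 of the result; make the two branches one 'set'
  have hbodyA : (fun (dec : List Int) (p : Int × List Char) =>
      if p.2.length = 0 then dec.set p.1.toNat 0
      else dec.set p.1.toNat (PySem.Int.mod ((lettre_freq_maxA p.2 : Int) - 4) 26))
      = (fun dec p => dec.set p.1.toNat (valA p.2)) := by
    funext dec p
    rw [valA, apply_ite (dec.set p.1.toNat)]
  rw [hbodyA]
  have hlenA : (List.replicate k.toNat (0 : Int)).length = 0 + cols.length := by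
    simp [hcolslen]
  have hA := set_fold_map valA cols 0 _ hlenA
  rw [show ((0 : Nat) : Int) = (0 : Int) by rfl] at hA
  rw [hA, List.take_zero, List.nil_append]
  -- B's loop appends one value per column
  have hbodyB : (fun (dec : List Int) (col : List Char) =>
      if col = [] then dec ++ [(0 : Int)]
      else dec ++ [PySem.Int.mod (((runScan (PySem.List.sorted
        (col.filter (fun c => decide ('A' ≤ c ∧ c ≤ 'Z'))) (fun c => c) false)).1 : Int) - 4) 26])
      = (fun dec col => dec ++ [valB col]) := by
    funext dec col
    rw [valB, apply_ite (fun t => dec ++ [t])]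
  rw [hbodyB, PySem.List.foldl_append_singleton_eq_map, List.nil_append]
  exact List.map_congr_left (fun col _ => perCol col)
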